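-- pv_equiv track=rewrite | github.com/MohammadT76/Python-Project | Python Programs/Numbers of Letters of Numbers.py | number_2_word
-- ===== SOURCE A (Python) =====
-- def number_2_word(n):
--     # for more information see this link : https://www.askpython.com/python/examples/convert-number-to-words
--
--     arr = ['zero','one','two','three','four','five','six','seven','eight','nine']
--     # If all the digits are encountered return blank string
--     if(n==0):
--         return ""
--     else:
--         # compute spelling for the last digit
--         small_ans = arr[n%10]
--         # keep computing for the previous digits and add the spelling for the last digit
--         ans = number_2_word(int(n/10)) + small_ans + ""
--     # Return the final answer
--     return ans
-- ===== SOURCE B (Python) =====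
-- def number_2_word(n):
--     arr = ['zero','one','two','three','four','five','six','seven','eight','nine']
--     ans = ''
--     while n != 0:
--         ans = arr[n % 10] + ans
--         n = int(n / 10)
--     return ans
-- ===== Notes on version B (the rewrite author's own statement) =====
-- stated objective: idiomatic
-- what changed: Replaced the non-tail recursion that appends each spelled digit after the recursive result with an explicit while loop that prepends each spelled digit to an accumulator string.
import Mathlib
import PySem

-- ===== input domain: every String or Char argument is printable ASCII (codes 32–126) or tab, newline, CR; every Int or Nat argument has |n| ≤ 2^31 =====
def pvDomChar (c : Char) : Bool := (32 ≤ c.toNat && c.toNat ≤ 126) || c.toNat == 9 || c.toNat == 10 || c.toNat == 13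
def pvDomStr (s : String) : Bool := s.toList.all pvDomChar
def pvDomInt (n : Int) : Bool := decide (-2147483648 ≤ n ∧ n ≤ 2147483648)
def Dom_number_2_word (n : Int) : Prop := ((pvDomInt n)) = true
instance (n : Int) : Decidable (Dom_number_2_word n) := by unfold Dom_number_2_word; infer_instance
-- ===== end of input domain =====

-- B replaces A's non-tail recursion by an explicit loop prepending each spelled digit to an accumulator (idiomatic iterative form, same cost).

-- ===== PORT A =====
-- arr of A (and of B; both sources spell the same literal list)
def pvArr : List String := ["zero","one","two","three","four","five","six","seven","eight","nine"]

-- termination helper cited by both ports' recursion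
theorem pvTdiv10_lt (n : Int) (h : ¬ n = 0) : (n.tdiv 10).natAbs < n.natAbs := by
  rw [Int.natAbs_tdiv]
  exact Nat.div_lt_self (Int.natAbs_pos.mpr h) (by decide)

-- int(n/10) is float division truncated toward zero; on |n| ≤ 2^31 this is exactly Int.tdiv n 10
def number_2_word (n : Int) : String :=
  if n = 0 then ""
  else
    -- small_ans = arr[n%10]  (Python % with positive divisor: PySem.Int.mod)
    let small_ans := (PySem.List.pyGet? pvArr (PySem.Int.mod n 10)).getD ""
    number_2_word (n.tdiv 10) ++ small_ans ++ ""
termination_by n.natAbs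
decreasing_by exact pvTdiv10_lt n (by assumption)

-- ===== PORT B =====
-- the while loop of B, with its accumulator ans
def pvLoop (n : Int) (ans : String) : String :=
  if n = 0 then ans
  else pvLoop (n.tdiv 10) (((PySem.List.pyGet? pvArr (PySem.Int.mod n 10)).getD "") ++ ans)
termination_by n.natAbs
decreasing_by exact pvTdiv10_lt n (by assumption)

def number_2_word_alt (n : Int) : String := pvLoop n ""

-- ===== PRECONDITION & SPEC =====
def Spec_number_2_word (n : Int) (out : String) : Prop := out = number_2_word_alt n
instance (n : Int) (out : String) : Decidable (Spec_number_2_word n out) := by unfold Spec_number_2_word; infer_instance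

-- ===== CLAIM (what is proved, stated in full; the proofs are below) =====
def Claim_equal_number_2_word : Prop := ∀ (n : Int), Dom_number_2_word n → Spec_number_2_word n (number_2_word n)

-- ===== LEMMAS AND PROOFS =====
theorem pvLoop_eq (n : Int) (ans : String) : pvLoop n ans = number_2_word n ++ ans := by
  induction n, ans using pvLoop.induct with
  | case1 ans => simp [pvLoop, number_2_word]
  | case2 n ans h ih =>
      rw [pvLoop, number_2_word]
      simp only [h, if_false, ih]
      simp [String.append_assoc]

-- ===== VERDICT (by name: the statement is the Claim_ definition above) =====
theorem number_2_word_spec : Claim_equal_number_2_word := by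
  intro n _
  unfold Spec_number_2_word number_2_word_alt
  rw [pvLoop_eq]
  simp
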